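-- pv_equiv track=rewrite | github.com/zinziroge/atcoder | src/sample.py | calc
-- ===== SOURCE A (Python) =====
-- def calc(a_list):
--   b_list = []
--   for a in a_list:
--     if a%2==0:
--       b_list.append(a//2)
--     else:
--       return []
--   return b_list
-- ===== SOURCE B (Python) =====
-- def calc(a_list):
--   def go(lo, hi):
--     # halved values of a_list[lo:hi], or None if some element there is odd
--     if hi - lo == 0:
--       return []
--     if hi - lo == 1:
--       x = a_list[lo]
--       return None if x % 2 else [x // 2]
--     mid = (lo + hi) // 2
--     left = go(lo, mid)
--     if left is None:
--       return None
--     right = go(mid, hi)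
--     return None if right is None else left + right
--   r = go(0, len(a_list))
--   return [] if r is None else r
-- ===== Notes on version B (the rewrite author's own statement) =====
-- stated objective: alternative
-- what changed: Replaces A's single left-to-right loop with early exit and an append accumulator by a divide-and-conquer recursion over index ranges that halves each singleton segment, propagates a None failure sentinel upward, and concatenates the halved sub-results.
import Mathlib
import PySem

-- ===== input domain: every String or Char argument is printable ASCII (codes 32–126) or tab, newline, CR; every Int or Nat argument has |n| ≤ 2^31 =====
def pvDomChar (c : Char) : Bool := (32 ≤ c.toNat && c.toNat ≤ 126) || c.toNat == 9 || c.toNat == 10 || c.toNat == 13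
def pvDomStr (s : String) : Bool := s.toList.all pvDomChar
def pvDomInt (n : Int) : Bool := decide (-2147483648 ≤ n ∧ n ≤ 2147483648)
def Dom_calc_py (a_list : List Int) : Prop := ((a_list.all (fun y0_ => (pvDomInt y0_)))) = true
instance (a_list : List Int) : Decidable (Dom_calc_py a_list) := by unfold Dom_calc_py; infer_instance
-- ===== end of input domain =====

-- B replaces A's left-to-right early-exit accumulator loop by a divide-and-conquer recursion
-- over index ranges with a None failure sentinel (alternative decomposition, same result).

-- ===== PORT A =====
-- A's loop: accumulate b_list; return [] immediately on the first odd element.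
def calc_py_loop (b_list : List Int) : List Int → List Int
  | [] => b_list
  | a :: rest =>
      if PySem.Int.mod a 2 = 0 then calc_py_loop (b_list ++ [PySem.Int.floordiv a 2]) rest
      else []

def calc_py (a_list : List Int) : List Int := calc_py_loop [] a_list

-- ===== PORT B =====
-- B's helper go(lo, hi): halved values of a_list[lo:hi], none if some element there is odd
-- (a_list[lo] is ported with pyGet?; the none branch of the match is Python's IndexError, unreachable here).
def calc_py_alt_go (a_list : List Int) (lo hi : Nat) : Option (List Int) :=
  if hi - lo = 0 then some []
  else if hi - lo = 1 then
    match PySem.List.pyGet? a_list (lo : Int) with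
    | none => none
    | some x => if PySem.Int.mod x 2 ≠ 0 then none else some [PySem.Int.floordiv x 2]
  else
    let mid := (lo + hi) / 2
    match calc_py_alt_go a_list lo mid with
    | none => none
    | some left =>
        match calc_py_alt_go a_list mid hi with
        | none => none
        | some right => some (left ++ right)
termination_by hi - lo
decreasing_by all_goals omega

def calc_py_alt (a_list : List Int) : List Int :=
  match calc_py_alt_go a_list 0 a_list.length with
  | none => []
  | some r => r

-- ===== PRECONDITION & SPEC =====
def Spec_calc_py (a_list : List Int) (out : List Int) : Prop := out = calc_py_alt a_list
instance (a_list : List Int) (out : List Int) : Decidable (Spec_calc_py a_list out) := by unfold Spec_calc_py; infer_instance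

-- ===== CLAIM (what is proved, stated in full; the proofs are below) =====
def Claim_equal_calc_py : Prop := ∀ (a_list : List Int), Dom_calc_py a_list → Spec_calc_py a_list (calc_py a_list)

-- ===== LEMMAS AND PROOFS =====
-- Both sides equal the same closed characterisation over the relevant segment:
-- the halved segment when every element is even, the failure value otherwise.

theorem calc_py_loop_eq (xs : List Int) : ∀ (bl : List Int),
    calc_py_loop bl xs =
      if xs.all (fun a => PySem.Int.mod a 2 = 0) then
        bl ++ xs.map (fun a => PySem.Int.floordiv a 2)
      else [] := by
  induction xs with
  | nil => intro bl; simp [calc_py_loop]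
  | cons a rest ih =>
      intro bl
      by_cases h : (2:Int) ∣ a
      · simp [calc_py_loop, ih, h]
      · simp [calc_py_loop, h]

-- the segment a_list[lo:hi] (empty when hi ≤ lo)
def pvSeg (a_list : List Int) (lo hi : Nat) : List Int := (a_list.drop lo).take (hi - lo)

theorem pvSeg_split (a_list : List Int) (lo mid hi : Nat) (h1 : lo ≤ mid) (h2 : mid ≤ hi) :
    pvSeg a_list lo hi = pvSeg a_list lo mid ++ pvSeg a_list mid hi := by
  unfold pvSeg
  have : hi - lo = (mid - lo) + (hi - mid) := by omega
  rw [this, List.take_add, List.drop_drop]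
  have e : lo + (mid - lo) = mid := by omega
  rw [e]

theorem calc_py_alt_go_eq (a_list : List Int) : ∀ (n lo hi : Nat), hi - lo ≤ n → hi ≤ a_list.length →
    calc_py_alt_go a_list lo hi =
      if (pvSeg a_list lo hi).all (fun a => PySem.Int.mod a 2 = 0) then
        some ((pvSeg a_list lo hi).map (fun a => PySem.Int.floordiv a 2))
      else none := by
  intro n
  induction n with
  | zero =>
      intro lo hi hn _
      rw [calc_py_alt_go, if_pos (by omega)]
      simp [pvSeg, show hi - lo = 0 by omega]
  | succ n ih =>
      intro lo hi hn hlen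
      by_cases h0 : hi - lo = 0
      · rw [calc_py_alt_go, if_pos h0]
        simp [pvSeg, h0]
      · by_cases h1 : hi - lo = 1
        · have hlo : lo < a_list.length := by omega
          have hseg : pvSeg a_list lo hi = [a_list[lo]] := by
            unfold pvSeg
            rw [h1]
            rw [List.take_one]
            simp [List.head?_drop, List.getElem?_eq_getElem hlo]
          rw [calc_py_alt_go, if_neg h0, if_pos h1, hseg]
          rw [PySem.List.pyGet?_natCast, List.getElem?_eq_getElem hlo]
          by_cases hx : (2:Int) ∣ a_list[lo]
          · simp only [List.all_cons, List.all_nil, Bool.and_true]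
            rw [if_neg (by simpa using hx), if_pos (by simpa using hx)]
            simp
          · simp only [List.all_cons, List.all_nil, Bool.and_true]
            rw [if_pos (by simpa using hx), if_neg (by simpa using hx)]
        · have hmid1 : lo ≤ (lo + hi) / 2 := by omega
          have hmid2 : (lo + hi) / 2 ≤ hi := by omega
          rw [calc_py_alt_go, if_neg h0, if_neg h1]
          dsimp only []
          rw [ih lo ((lo + hi) / 2) (by omega) (by omega),
              ih ((lo + hi) / 2) hi (by omega) hlen,
              pvSeg_split a_list lo ((lo + hi) / 2) hi hmid1 hmid2]
          by_cases hl : (pvSeg a_list lo ((lo + hi) / 2)).all (fun a => decide (PySem.Int.mod a 2 = 0)) = true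
          · by_cases hr : (pvSeg a_list ((lo + hi) / 2) hi).all (fun a => decide (PySem.Int.mod a 2 = 0)) = true
            · rw [if_pos hl]
              rw [if_pos hr]
              rw [if_pos (show ((pvSeg a_list lo ((lo + hi) / 2) ++ pvSeg a_list ((lo + hi) / 2) hi).all
                    (fun a => decide (PySem.Int.mod a 2 = 0))) = true by
                  rw [List.all_append, Bool.and_eq_true]; exact ⟨hl, hr⟩)]
              simp [List.map_append]
            · rw [if_pos hl]
              rw [if_neg hr]
              rw [if_neg (show ¬((pvSeg a_list lo ((lo + hi) / 2) ++ pvSeg a_list ((lo + hi) / 2) hi).all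
                    (fun a => decide (PySem.Int.mod a 2 = 0))) = true by
                  intro hc; rw [List.all_append, Bool.and_eq_true] at hc; exact hr hc.2)]
          · rw [if_neg hl]
            rw [if_neg (show ¬((pvSeg a_list lo ((lo + hi) / 2) ++ pvSeg a_list ((lo + hi) / 2) hi).all
                  (fun a => decide (PySem.Int.mod a 2 = 0))) = true by
                intro hc; rw [List.all_append, Bool.and_eq_true] at hc; exact hl hc.1)]


-- ===== VERDICT (by name: the statement is the Claim_ definition above) =====
theorem calc_py_spec : Claim_equal_calc_py := by
  intro a_list _
  unfold Spec_calc_py calc_py calc_py_alt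
  rw [calc_py_loop_eq,
      calc_py_alt_go_eq a_list a_list.length 0 a_list.length (by omega) (le_refl _)]
  have hseg : pvSeg a_list 0 a_list.length = a_list := by simp [pvSeg]
  rw [hseg]
  by_cases h : (a_list.all fun x => decide (PySem.Int.mod x 2 = 0)) = true
  · rw [if_pos h, if_pos h]; simp
  · rw [if_neg h, if_neg h]
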